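-- pv_equiv track=rewrite | github.com/not-Whale/tfl_labs | lab1_null/src/main.py | is_compose_positive
-- ===== SOURCE A (Python) =====
-- def is_compose_positive(compose):
--     answer = False
--     i = len(compose) - 1
--     while i >= 0 and compose[i] == 0:
--         i -= 1
--
--     if i >= 0 and compose[i] > 0:
--         return True
--
--     return answer
-- ===== SOURCE B (Python) =====
-- def is_compose_positive(compose):
--     acc = 0
--     for x in compose:
--         if x != 0:
--             acc = x
--     return acc > 0
-- ===== Notes on version B (the rewrite author's own statement) =====
-- stated objective: simpler
-- what changed: Replaces the backward skip-zeros index scan plus sign test with a single forward fold keeping the most recent nonzero value in an accumulator and testing its sign once.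
import Mathlib
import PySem

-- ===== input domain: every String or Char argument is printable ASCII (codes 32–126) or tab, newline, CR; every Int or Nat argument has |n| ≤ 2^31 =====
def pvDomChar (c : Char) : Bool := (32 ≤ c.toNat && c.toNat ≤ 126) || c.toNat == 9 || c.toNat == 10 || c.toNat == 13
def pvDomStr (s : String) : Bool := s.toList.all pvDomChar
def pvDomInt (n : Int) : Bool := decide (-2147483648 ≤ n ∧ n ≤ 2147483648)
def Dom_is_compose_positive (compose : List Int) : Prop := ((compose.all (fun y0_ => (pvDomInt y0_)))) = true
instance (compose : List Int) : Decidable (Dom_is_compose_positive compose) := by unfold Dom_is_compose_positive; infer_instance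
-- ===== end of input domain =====

-- B replaces A's backward skip-zeros scan by a single forward fold keeping the last nonzero value (simpler).

-- ===== PORT A =====
-- while i >= 0 and compose[i] == 0: i -= 1   (i stays in range whenever 0 ≤ i ≤ len-1, so pyGetD is exact there)
def pvALoop (compose : List Int) (i : Int) : Int :=
  if 0 ≤ i ∧ PySem.List.pyGetD compose i 0 = 0 then pvALoop compose (i - 1) else i
termination_by (i + 1).toNat
decreasing_by omega

def is_compose_positive (compose : List Int) : Bool :=
  let answer := false
  let i := pvALoop compose ((compose.length : Int) - 1)
  if 0 ≤ i ∧ PySem.List.pyGetD compose i 0 > 0 then true else answer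

-- ===== PORT B =====
def is_compose_positive_alt (compose : List Int) : Bool :=
  decide (compose.foldl (fun acc x => if x ≠ 0 then x else acc) 0 > 0)

-- ===== PRECONDITION & SPEC =====
def Spec_is_compose_positive (compose : List Int) (out : Bool) : Prop := out = is_compose_positive_alt compose
instance (compose : List Int) (out : Bool) : Decidable (Spec_is_compose_positive compose out) := by unfold Spec_is_compose_positive; infer_instance

-- ===== CLAIM (what is proved, stated in full; the proofs are below) =====
def Claim_equal_is_compose_positive : Prop := ∀ (compose : List Int), Dom_is_compose_positive compose → Spec_is_compose_positive compose (is_compose_positive compose)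

-- ===== LEMMAS AND PROOFS =====

theorem pvALoop_eq (xs : List Int) (i : Int) :
    pvALoop xs i = if 0 ≤ i ∧ PySem.List.pyGetD xs i 0 = 0 then pvALoop xs (i - 1) else i := by
  rw [pvALoop]

theorem portA_eq (xs : List Int) :
    is_compose_positive xs =
      (if 0 ≤ pvALoop xs ((xs.length : Int) - 1) ∧
          PySem.List.pyGetD xs (pvALoop xs ((xs.length : Int) - 1)) 0 > 0 then true else false) := rfl

theorem pvALoop_le (compose : List Int) (i : Int) : pvALoop compose i ≤ i := by
  induction i using pvALoop.induct compose with
  | case1 i h ih => rw [pvALoop_eq compose i, if_pos h]; omega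
  | case2 i h => rw [pvALoop_eq compose i, if_neg h]

theorem pyGetD_append_left (xs : List Int) (x i : Int) (h0 : 0 ≤ i) (hi : i < (xs.length : Int)) :
    PySem.List.pyGetD (xs ++ [x]) i 0 = PySem.List.pyGetD xs i 0 := by
  rw [PySem.List.pyGetD_eq_getElem _ _ h0 (by simp; omega),
      PySem.List.pyGetD_eq_getElem _ _ h0 hi]
  rw [List.getElem_append_left (by omega)]

-- the loop never inspects positions ≥ i, so a longer suffix is irrelevant
theorem pvALoop_append (compose : List Int) (x : Int) (i : Int) (hi : i < (compose.length : Int)) :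
    pvALoop (compose ++ [x]) i = pvALoop compose i := by
  induction i using pvALoop.induct compose with
  | case1 i h ih =>
    have hg := pyGetD_append_left compose x i h.1 hi
    rw [pvALoop_eq (compose ++ [x]) i, pvALoop_eq compose i, if_pos h,
        if_pos (by rw [hg]; exact h)]
    exact ih (by omega)
  | case2 i h =>
    by_cases h0 : 0 ≤ i
    · have hg := pyGetD_append_left compose x i h0 hi
      rw [pvALoop_eq (compose ++ [x]) i, pvALoop_eq compose i, if_neg h,
          if_neg (by rw [hg]; exact h)]
    · rw [pvALoop_eq (compose ++ [x]) i, pvALoop_eq compose i,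
          if_neg (by omega), if_neg (by omega)]

theorem portA_append (compose : List Int) (x : Int) :
    is_compose_positive (compose ++ [x]) =
      (if x ≠ 0 then decide (x > 0) else is_compose_positive compose) := by
  have hlen : ((compose ++ [x]).length : Int) - 1 = (compose.length : Int) := by simp
  have hget : PySem.List.pyGetD (compose ++ [x]) (compose.length : Int) 0 = x := by
    rw [PySem.List.pyGetD_eq_getElem _ _ (by omega) (by simp)]
    simp
  rw [portA_eq, portA_eq, hlen]
  by_cases hx : x = 0
  · subst hx
    have hA : pvALoop (compose ++ [0]) (compose.length : Int) =
        pvALoop compose ((compose.length : Int) - 1) := by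
      rw [pvALoop_eq (compose ++ [0]) (compose.length : Int), if_pos ⟨by omega, hget⟩,
          pvALoop_append compose 0 _ (by omega)]
    rw [hA]
    simp only [ne_eq, not_true_eq_false, if_false]
    set j := pvALoop compose ((compose.length : Int) - 1) with hj
    have hjle : j ≤ (compose.length : Int) - 1 := pvALoop_le _ _
    by_cases h0 : 0 ≤ j
    · rw [pyGetD_append_left compose 0 j h0 (by omega)]
    · rw [if_neg (by omega), if_neg (by omega)]
  · have hA : pvALoop (compose ++ [x]) (compose.length : Int) = (compose.length : Int) := by
      rw [pvALoop_eq (compose ++ [x]) (compose.length : Int)]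
      exact if_neg (by rw [hget]; tauto)
    rw [hA, hget]
    simp only [ne_eq, hx, not_false_eq_true, if_true]
    by_cases hp : x > 0
    · rw [if_pos ⟨by omega, hp⟩]; simp [hp]
    · rw [if_neg (by omega)]; simp [hp]

theorem portB_append (compose : List Int) (x : Int) :
    is_compose_positive_alt (compose ++ [x]) =
      (if x ≠ 0 then decide (x > 0) else is_compose_positive_alt compose) := by
  unfold is_compose_positive_alt
  rw [List.foldl_append]
  by_cases hx : x = 0 <;> simp [hx]

-- ===== VERDICT (by name: the statement is the Claim_ definition above) =====
theorem is_compose_positive_spec : Claim_equal_is_compose_positive := by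
  intro compose hdom
  unfold Spec_is_compose_positive
  induction compose using List.reverseRecOn with
  | nil =>
    rw [portA_eq, pvALoop_eq]
    norm_num [is_compose_positive_alt]
  | append_singleton xs x ih =>
    have hdxs : Dom_is_compose_positive xs := by
      unfold Dom_is_compose_positive at hdom ⊢
      simp only [List.all_append, Bool.and_eq_true] at hdom
      exact hdom.1
    rw [portA_append, portB_append]
    by_cases hx : x = 0
    · simp only [ne_eq, hx, not_true_eq_false, if_false]; exact ih hdxs
    · simp [hx]
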